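-- pv_equiv track=rewrite | github.com/robindeshwal/Data-structure-and-algorithms-with-python | tries/hw_questions.py | array_subset
-- ===== SOURCE A (Python) =====
-- from collections import Counter
--
-- def array_subset(a1, a2, n, m):
--   """
--   GFG: Array Subset -> Array subset of another array.
--   """
--   a1 = Counter(a1)
--
--   for i in range(m):
--     if a2[i] in a1 and a1[a2[i]] > 0:
--       a1[a2[i]] -= 1
--     else:
--       return "No"
--
--   return "Yes"
-- ===== SOURCE B (Python) =====
-- def array_subset(a1, a2, n, m):
--     prefix = [a2[i] for i in range(m)]
--     return "Yes" if all(prefix.count(x) <= a1.count(x) for x in set(prefix)) else "No"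
-- ===== Notes on version B (the rewrite author's own statement) =====
-- stated objective: simpler
-- what changed: B drops the Counter entirely: it materialises the queried prefix and compares per-element list.count of prefix vs a1 over the distinct prefix elements, instead of A's early-exit scan that decrements a mutable Counter of a1.
-- outside the precondition, e.g. on array_subset([], [5], 0, 3): A returns 'No', B raises IndexError
import Mathlib
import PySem

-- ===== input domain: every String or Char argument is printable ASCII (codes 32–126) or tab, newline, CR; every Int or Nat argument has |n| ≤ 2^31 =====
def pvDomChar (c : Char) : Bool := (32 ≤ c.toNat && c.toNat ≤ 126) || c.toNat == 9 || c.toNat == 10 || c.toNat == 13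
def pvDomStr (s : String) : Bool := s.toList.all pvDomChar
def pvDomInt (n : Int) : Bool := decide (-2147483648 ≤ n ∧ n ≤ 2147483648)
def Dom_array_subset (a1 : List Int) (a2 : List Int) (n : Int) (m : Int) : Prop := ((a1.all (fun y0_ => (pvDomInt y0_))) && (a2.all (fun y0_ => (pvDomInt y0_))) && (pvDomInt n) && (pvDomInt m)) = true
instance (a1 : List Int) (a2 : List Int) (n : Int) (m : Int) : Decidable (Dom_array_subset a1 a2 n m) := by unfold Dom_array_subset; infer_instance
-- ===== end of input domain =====

-- B drops the Counter: it materialises the queried prefix and compares list.count of prefix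
-- against a1 per distinct prefix element, instead of A's early-exit scan that decrements a
-- mutable Counter of a1. Pre_ excludes m > len(a2), where both Pythons can raise IndexError.


-- ===== PORT A =====
-- the for-loop over range(m), early return "No"; "IndexError" stands for the raise (outside Pre_)
def pvLoopA (a2 : List Int) (d : PySem.Dict Int Int) (i m : Int) : String :=
  if h : i < m then
    match PySem.List.pyGet? a2 i with
    | none => "IndexError"
    | some x =>
      if d.contains x && decide (0 < d.getD x 0) then
        pvLoopA a2 (d.insert x (d.getD x 0 - 1)) (i + 1) m
      else "No"
  else "Yes"
termination_by (m - i).toNat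
decreasing_by omega

def array_subset (a1 : List Int) (a2 : List Int) (n : Int) (m : Int) : String :=
  pvLoopA a2 (PySem.Dict.counter a1) 0 m

-- ===== PORT B =====
-- '[a2[i] for i in range(m)]'; on an out-of-range index Python raises IndexError (outside Pre_),
-- here ported as .getD 0
def array_subset_alt (a1 : List Int) (a2 : List Int) (n : Int) (m : Int) : String :=
  let pref := (PySem.List.pyRange 0 m 1).map (fun i => (PySem.List.pyGet? a2 i).getD 0)
  if (PySem.Set.ofList pref).all (fun x => decide (pref.count x ≤ a1.count x))
  then "Yes" else "No"

-- ===== PRECONDITION & SPEC =====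
-- Pre_ excludes m > len(a2): there Python A raises IndexError unless an earlier prefix element
-- already fails (then A returns "No"), while B's prefix comprehension always raises IndexError.
def Pre_array_subset (a1 : List Int) (a2 : List Int) (n : Int) (m : Int) : Prop :=
  m ≤ (a2.length : Int)
instance (a1 : List Int) (a2 : List Int) (n : Int) (m : Int) : Decidable (Pre_array_subset a1 a2 n m) := by unfold Pre_array_subset; infer_instance

def pvWitness_array_subset : List Int × List Int × Int × Int := ([1, 2, 2, 3], [2, 1], 4, 2)

def Spec_array_subset (a1 : List Int) (a2 : List Int) (n : Int) (m : Int) (out : String) : Prop := out = array_subset_alt a1 a2 n m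
instance (a1 : List Int) (a2 : List Int) (n : Int) (m : Int) (out : String) : Decidable (Spec_array_subset a1 a2 n m out) := by unfold Spec_array_subset; infer_instance

-- ===== CLAIM (what is proved, stated in full; the proofs are below) =====
def Claim_equal_array_subset : Prop := ∀ (a1 : List Int) (a2 : List Int) (n : Int) (m : Int), Dom_array_subset a1 a2 n m → Pre_array_subset a1 a2 n m → Spec_array_subset a1 a2 n m (array_subset a1 a2 n m)

-- ===== LEMMAS AND PROOFS =====

-- A's loop, rephrased over the list of indices (proof-side only)
def pvLoopAL (a2 : List Int) (d : PySem.Dict Int Int) : List Int → String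
  | [] => "Yes"
  | i :: rest =>
    match PySem.List.pyGet? a2 i with
    | none => "IndexError"
    | some x =>
      if d.contains x && decide (0 < d.getD x 0) then
        pvLoopAL a2 (d.insert x (d.getD x 0 - 1)) rest
      else "No"

lemma pvLoopA_eq_pvLoopAL (a2 : List Int) (m : Int) :
    ∀ (fuel : Nat) (i : Int) (d : PySem.Dict Int Int), (m - i).toNat = fuel →
      pvLoopA a2 d i m = pvLoopAL a2 d (PySem.List.pyRange i m 1) := by
  intro fuel
  induction fuel with
  | zero =>
    intro i d hf
    rw [pvLoopA, dif_neg (by omega), PySem.List.pyRange_one_eq_nil (by omega)]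
    rfl
  | succ k ih =>
    intro i d hf
    have hlt : i < m := by omega
    rw [pvLoopA, dif_pos hlt, PySem.List.pyRange_one_cons hlt]
    simp only [pvLoopAL]
    cases PySem.List.pyGet? a2 i with
    | none => rfl
    | some x =>
      simp only
      split
      · exact ih (i + 1) _ (by omega)
      · rfl

-- A's scan, rephrased over the list of prefix ELEMENTS (no indexing)
def pvScanA (d : PySem.Dict Int Int) : List Int → String
  | [] => "Yes"
  | x :: rest =>
    if d.contains x && decide (0 < d.getD x 0) then
      pvScanA (d.insert x (d.getD x 0 - 1)) rest
    else "No"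

lemma pvLoopAL_eq_scan (a2 : List Int) (idx : List Int) (d : PySem.Dict Int Int)
    (h : ∀ i ∈ idx, ∃ x, PySem.List.pyGet? a2 i = some x) :
    pvLoopAL a2 d idx = pvScanA d (idx.map (fun i => (PySem.List.pyGet? a2 i).getD 0)) := by
  induction idx generalizing d with
  | nil => rfl
  | cons i rest ih =>
    obtain ⟨x, hx⟩ := h i (List.mem_cons_self ..)
    simp only [pvLoopAL, pvScanA, List.map_cons, hx, Option.getD_some]
    split
    · exact ih _ (fun j hj => h j (List.mem_cons_of_mem _ hj))
    · rfl

lemma pvScanA_yes_iff (xs : List Int) (d : PySem.Dict Int Int)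
    (h0 : ∀ k, 0 ≤ d.getD k 0) :
    pvScanA d xs = "Yes" ↔ ∀ k, (xs.count k : Int) ≤ d.getD k 0 := by
  induction xs generalizing d with
  | nil => simp [pvScanA, h0]
  | cons x rest ih =>
    have hcx : ((x :: rest).count x : Int) = (rest.count x : Int) + 1 := by
      simp
    have hcne : ∀ k, k ≠ x → ((x :: rest).count k : Int) = (rest.count k : Int) := by
      intro k hne; simp [Ne.symm hne]
    simp only [pvScanA]
    by_cases hc : d.contains x = true ∧ 0 < d.getD x 0
    · rw [if_pos (by simp [hc.1, hc.2])]
      have h0' : ∀ k, 0 ≤ (d.insert x (d.getD x 0 - 1)).getD k 0 := by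
        intro k
        rw [PySem.Dict.getD_insert]
        split_ifs with hk
        · omega
        · exact h0 k
      rw [ih _ h0']
      constructor
      · intro hall k
        have hk := hall k
        rw [PySem.Dict.getD_insert] at hk
        rcases eq_or_ne k x with rfl | hne
        · rw [if_pos rfl] at hk; omega
        · rw [if_neg hne] at hk; rw [hcne k hne]; exact hk
      · intro hall k
        have hk := hall k
        rw [PySem.Dict.getD_insert]
        rcases eq_or_ne k x with rfl | hne
        · rw [if_pos rfl]; omega
        · rw [if_neg hne]; rw [hcne k hne] at hk; exact hk
    · rw [if_neg (by simpa [Bool.and_eq_true, decide_eq_true_iff] using hc)]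
      constructor
      · intro h'; exact absurd h' (by decide)
      · intro hall
        exfalso
        have hx := hall x
        by_cases hct : d.contains x = true
        · have hle : ¬ 0 < d.getD x 0 := fun hp => hc ⟨hct, hp⟩
          have hnn : (0 : Int) ≤ (rest.count x : Int) := by positivity
          omega
        · rw [PySem.Dict.getD_of_not_contains d 0 (by simpa using hct)] at hx
          have hnn : (0 : Int) ≤ (rest.count x : Int) := by positivity
          omega

lemma pvScanA_cases (xs : List Int) (d : PySem.Dict Int Int) :
    pvScanA d xs = "Yes" ∨ pvScanA d xs = "No" := by
  induction xs generalizing d with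
  | nil => exact Or.inl rfl
  | cons x rest ih =>
    simp only [pvScanA]
    split
    · exact ih _
    · exact Or.inr rfl

-- B's per-distinct-element count comparison, as a proposition over all keys
lemma pvAlt_all_iff (xs a1 : List Int) :
    ((PySem.Set.ofList xs).all (fun x => decide (xs.count x ≤ a1.count x)) = true)
      ↔ ∀ k, (xs.count k : Int) ≤ (PySem.Dict.counter a1).getD k 0 := by
  rw [List.all_eq_true]
  constructor
  · intro hall k
    rw [PySem.Dict.getD_counter]
    by_cases hk : k ∈ xs
    · have := hall k (by rw [PySem.Set.mem_ofList]; exact hk)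
      simp only [decide_eq_true_iff] at this
      exact_mod_cast this
    · rw [List.count_eq_zero_of_not_mem hk]; positivity
  · intro hall x hx
    have := hall x
    rw [PySem.Dict.getD_counter] at this
    simp only [decide_eq_true_iff]
    exact_mod_cast this

lemma pvCore (xs a1 : List Int) :
    pvScanA (PySem.Dict.counter a1) xs =
      (if (PySem.Set.ofList xs).all (fun x => decide (xs.count x ≤ a1.count x))
       then "Yes" else "No") := by
  have h0 : ∀ k, 0 ≤ (PySem.Dict.counter a1).getD k 0 := by
    intro k; rw [PySem.Dict.getD_counter]; positivity
  by_cases hb : (PySem.Set.ofList xs).all (fun x => decide (xs.count x ≤ a1.count x)) = true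
  · rw [if_pos hb]
    exact (pvScanA_yes_iff xs _ h0).mpr ((pvAlt_all_iff xs a1).mp hb)
  · rw [if_neg hb]
    rcases pvScanA_cases xs (PySem.Dict.counter a1) with h | h
    · exact absurd ((pvAlt_all_iff xs a1).mpr ((pvScanA_yes_iff xs _ h0).mp h)) hb
    · exact h

-- ===== VERDICT (by name: the statement is the Claim_ definition above) =====
theorem array_subset_spec : Claim_equal_array_subset := by
  intro a1 a2 n m _ hpre
  unfold Spec_array_subset array_subset array_subset_alt
  have hidx : ∀ i ∈ PySem.List.pyRange 0 m 1, ∃ x, PySem.List.pyGet? a2 i = some x := by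
    intro i hi
    rw [PySem.List.mem_pyRange_one] at hi
    have hlt : i < (a2.length : Int) := lt_of_lt_of_le hi.2 hpre
    exact ⟨a2[i.toNat]'(by omega), PySem.List.pyGet?_eq_some_getElem a2 hi.1 hlt⟩
  rw [pvLoopA_eq_pvLoopAL a2 m (m - 0).toNat 0 _ rfl, pvLoopAL_eq_scan a2 _ _ hidx, pvCore]
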